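-- pv_equiv track=rewrite | github.com/SUMIT-JADHAV-23/Hacker-earth-problem | string anagram.py | min_operations_to_anagram
-- ===== SOURCE A (Python) =====
-- def min_operations_to_anagram(s, t):
--     # Create dictionaries to store character frequencies
--     freq_s = {}
--     freq_t = {}
--
--     # Count character frequencies in string s
--     for char in s:
--         freq_s[char] = freq_s.get(char, 0) + 1
--
--     # Count character frequencies in string t
--     for char in t:
--         freq_t[char] = freq_t.get(char, 0) + 1
--
--     # Calculate the absolute difference in frequencies
--     diff = 0
--     for char in set(freq_s.keys()).union(set(freq_t.keys())):
--         diff += abs(freq_s.get(char, 0) - freq_t.get(char, 0))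
--
--     return diff
-- ===== SOURCE B (Python) =====
-- def min_operations_to_anagram(s, t):
--     # Greedy matching: count t's characters, consume one per matching char of s;
--     # answer = len(s) + len(t) - 2 * (number of matched characters).
--     avail = {}
--     for ch in t:
--         avail[ch] = avail.get(ch, 0) + 1
--     shared = 0
--     for ch in s:
--         if avail.get(ch, 0) > 0:
--             avail[ch] -= 1
--             shared += 1
--     return len(s) + len(t) - 2 * shared
-- ===== Notes on version B (the rewrite author's own statement) =====
-- stated objective: alternative
-- what changed: Replaces the two frequency dicts plus a per-character abs-difference sum over the key union with a single counter of t consumed greedily while scanning s, returning len(s)+len(t)-2*matched.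
import Mathlib
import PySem

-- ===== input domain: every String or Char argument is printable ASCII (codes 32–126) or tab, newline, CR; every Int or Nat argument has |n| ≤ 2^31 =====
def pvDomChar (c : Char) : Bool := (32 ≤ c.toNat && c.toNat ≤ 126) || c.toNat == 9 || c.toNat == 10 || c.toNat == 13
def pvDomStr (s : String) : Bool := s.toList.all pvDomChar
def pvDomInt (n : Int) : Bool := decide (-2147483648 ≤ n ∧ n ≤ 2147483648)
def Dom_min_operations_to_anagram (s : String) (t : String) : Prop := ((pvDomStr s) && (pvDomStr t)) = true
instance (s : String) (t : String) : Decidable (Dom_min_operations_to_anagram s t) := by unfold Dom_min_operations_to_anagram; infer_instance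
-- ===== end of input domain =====

-- B replaces A's two frequency dicts and abs-difference sum over the key union by one
-- counter of t consumed greedily while scanning s (len s + len t - 2*matched): an alternative decomposition, same cost.


-- ===== PORT A =====
def min_operations_to_anagram (s : String) (t : String) : Int :=
  let freq_s := s.toList.foldl (fun d c => d.insert c (d.getD c 0 + 1)) PySem.Dict.empty
  let freq_t := t.toList.foldl (fun d c => d.insert c (d.getD c 0 + 1)) PySem.Dict.empty
  let u := PySem.Set.union (PySem.Set.ofList freq_s.keys) (PySem.Set.ofList freq_t.keys)
  u.foldl (fun diff c => diff + |freq_s.getD c 0 - freq_t.getD c 0|) 0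

-- ===== PORT B =====
def min_operations_to_anagram_alt (s : String) (t : String) : Int :=
  let avail := t.toList.foldl (fun d c => d.insert c (d.getD c 0 + 1)) PySem.Dict.empty
  let res := s.toList.foldl
    (fun (st : PySem.Dict Char Int × Int) c =>
      if st.1.getD c 0 > 0 then (st.1.insert c (st.1.getD c 0 - 1), st.2 + 1) else st)
    (avail, 0)
  PySem.Str.len s + PySem.Str.len t - 2 * res.2

-- ===== PRECONDITION & SPEC =====
def Spec_min_operations_to_anagram (s : String) (t : String) (out : Int) : Prop := out = min_operations_to_anagram_alt s t
instance (s : String) (t : String) (out : Int) : Decidable (Spec_min_operations_to_anagram s t out) := by unfold Spec_min_operations_to_anagram; infer_instance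

-- ===== CLAIM (what is proved, stated in full; the proofs are below) =====
def Claim_equal_min_operations_to_anagram : Prop := ∀ (s : String) (t : String), Dom_min_operations_to_anagram s t → Spec_min_operations_to_anagram s t (min_operations_to_anagram s t)

-- ===== LEMMAS AND PROOFS =====

-- |x - y| = x + y - 2 * min x y over Int
theorem pv_abs_sub (x y : Int) : |x - y| = x + y - 2 * min x y := by
  rcases le_total x y with h | h
  · rw [abs_of_nonpos (by omega), min_eq_left h]; ring
  · rw [abs_of_nonneg (by omega), min_eq_right h]; ring

-- a sum of pointwise (f + g - 2*m) splits into three sums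
theorem pv_sum_split (u : List Char) (f g m : Char → Int) :
    (u.map (fun c => f c + g c - 2 * m c)).sum
      = (u.map f).sum + (u.map g).sum - 2 * (u.map m).sum := by
  induction u with
  | nil => simp
  | cons x xs ih => simp [ih]; ring

-- terms vanishing outside p can be filtered away
theorem pv_sum_filter (u : List Char) (f : Char → Int) (p : Char → Prop) [DecidablePred p]
    (h0 : ∀ c ∈ u, ¬ p c → f c = 0) :
    (u.map f).sum = ((u.filter (fun c => decide (p c))).map f).sum := by
  induction u with
  | nil => simp
  | cons x xs ih =>
      have ih' := ih (fun c hc => h0 c (List.mem_cons_of_mem _ hc))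
      by_cases hx : p x
      · simp [hx, ih']
      · simp [hx, h0 x List.mem_cons_self hx, ih']

-- over any nodup list covering a's elements, the Int-cast counts of a sum to a's length
theorem pv_sum_count (a : List Char) (u : List Char) (hu : u.Nodup)
    (hsub : ∀ x ∈ a, x ∈ u) :
    (u.map (fun c => (a.count c : Int))).sum = (a.length : Int) := by
  have h0 : ∀ c ∈ u, ¬ (c ∈ a) → (a.count c : Int) = 0 := by
    intro c _ hc
    simp [List.count_eq_zero_of_not_mem hc]
  rw [pv_sum_filter u _ (fun c => c ∈ a) h0]
  have hperm : (u.filter (fun c => decide (c ∈ a))).Perm a.dedup := by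
    rw [List.perm_ext_iff_of_nodup (hu.filter _) (List.nodup_dedup a)]
    intro x
    simp only [List.mem_filter, List.mem_dedup, decide_eq_true_eq]
    exact ⟨fun h => h.2, fun h => ⟨hsub x h, h⟩⟩
  rw [(hperm.map _).sum_eq]
  have hcast : (a.dedup.map (fun c => (a.count c : Int))).sum
      = ((a.dedup.map (fun c => a.count c)).sum : Int) := by
    induction a.dedup with
    | nil => simp
    | cons x xs ih => simp [ih]
  rw [hcast, List.sum_map_count_dedup_eq_length a]

-- a function vanishing outside p sums the same over any two nodup lists containing p's support
theorem pv_sum_reindex (u v : List Char) (hu : u.Nodup) (hv : v.Nodup)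
    (f : Char → Int) (p : Char → Prop) [DecidablePred p]
    (h0 : ∀ c, ¬ p c → f c = 0)
    (hm : ∀ c, p c → c ∈ u) (hm' : ∀ c, p c → c ∈ v) :
    (u.map f).sum = (v.map f).sum := by
  rw [pv_sum_filter u f p (fun c _ hc => h0 c hc),
      pv_sum_filter v f p (fun c _ hc => h0 c hc)]
  have hperm : (u.filter (fun c => decide (p c))).Perm (v.filter (fun c => decide (p c))) := by
    rw [List.perm_ext_iff_of_nodup (hu.filter _) (hv.filter _)]
    intro x
    simp only [List.mem_filter, decide_eq_true_eq]
    exact ⟨fun h => ⟨hm' x h.2, h.2⟩, fun h => ⟨hm x h.2, h.2⟩⟩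
  rw [(hperm.map _).sum_eq]

-- incrementing one entry of a nodup index list bumps the sum by one
theorem pv_sum_bump (u : List Char) (hu : u.Nodup) (ch : Char) (hch : ch ∈ u)
    (f g : Char → Int) (hne : ∀ c, c ≠ ch → g c = f c) (heq : g ch = f ch + 1) :
    (u.map g).sum = (u.map f).sum + 1 := by
  induction u with
  | nil => simp at hch
  | cons x xs ih =>
      rcases List.mem_cons.mp hch with rfl | hmem
      · have hxs : ∀ c ∈ xs, g c = f c := by
          intro c hc
          exact hne c (fun h => (List.nodup_cons.mp hu).1 (h ▸ hc))
        simp [heq, List.map_congr_left hxs]; ring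
      · have hx : g x = f x := hne x (fun h => (List.nodup_cons.mp hu).1 (h ▸ hmem))
        simp only [List.map_cons, List.sum_cons, hx, ih (List.nodup_cons.mp hu).2 hmem]
        ring

theorem pv_count_append_ne (l : List Char) (ch c : Char) (hc : c ≠ ch) :
    (l ++ [ch]).count c = l.count c := by
  simp [List.count_append, List.count_singleton]
  intro h; exact absurd h.symm hc

-- B's greedy loop: after scanning prefix l of s, avail holds b.count - min and
-- shared holds the sum of mins over b's distinct characters
theorem pv_greedy (b : List Char) (l : List Char) :
    (∀ c, (l.foldl
        (fun (st : PySem.Dict Char Int × Int) c =>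
          if st.1.getD c 0 > 0 then (st.1.insert c (st.1.getD c 0 - 1), st.2 + 1) else st)
        (PySem.Dict.counter b, 0)).1.getD c 0
        = (b.count c : Int) - min (b.count c : Int) (l.count c : Int))
    ∧ (l.foldl
        (fun (st : PySem.Dict Char Int × Int) c =>
          if st.1.getD c 0 > 0 then (st.1.insert c (st.1.getD c 0 - 1), st.2 + 1) else st)
        (PySem.Dict.counter b, 0)).2
        = ((PySem.Set.ofList b).map (fun c => min (b.count c : Int) (l.count c : Int))).sum := by
  induction l using List.reverseRecOn with
  | nil =>
      constructor
      · intro c; simp [PySem.Dict.getD_counter]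
      · simp
  | append_singleton l ch ih =>
      obtain ⟨ih1, ih2⟩ := ih
      rw [List.foldl_append]
      simp only [List.foldl_cons, List.foldl_nil]
      set st := l.foldl
        (fun (st : PySem.Dict Char Int × Int) c =>
          if st.1.getD c 0 > 0 then (st.1.insert c (st.1.getD c 0 - 1), st.2 + 1) else st)
        (PySem.Dict.counter b, 0) with hst
      have hcnt_ch : ((l ++ [ch]).count ch : Int) = (l.count ch : Int) + 1 := by
        simp [List.count_append]
      by_cases hpos : st.1.getD ch 0 > 0
      · have hlt : (l.count ch : Int) < (b.count ch : Int) := by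
          have := ih1 ch; rw [this] at hpos; omega
        have hminZ : min (b.count ch : Int) ((l ++ [ch]).count ch : Int)
            = min (b.count ch : Int) (l.count ch : Int) + 1 := by
          rw [hcnt_ch]; omega
        have hchb : ch ∈ b := by
          by_contra hnb
          rw [List.count_eq_zero_of_not_mem hnb] at hlt
          simp at hlt
          omega
        simp only [if_pos hpos]
        constructor
        · intro c
          rw [PySem.Dict.getD_insert]
          by_cases hc : c = ch
          · subst hc; rw [if_pos rfl, ih1 c, hminZ]; ring
          · rw [if_neg hc, ih1 c, pv_count_append_ne l ch c hc]
        · show st.2 + 1 = _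
          rw [ih2]
          refine (pv_sum_bump _ (PySem.Set.nodup_ofList b) ch
            ((PySem.Set.mem_ofList b ch).mpr hchb)
            (fun c => min (b.count c : Int) (l.count c : Int))
            (fun c => min (b.count c : Int) ((l ++ [ch]).count c : Int))
            (fun c hc => by
              show min (b.count c : Int) ((l ++ [ch]).count c : Int)
                  = min (b.count c : Int) (l.count c : Int)
              rw [pv_count_append_ne l ch c hc])
            (by
              show min (b.count ch : Int) ((l ++ [ch]).count ch : Int)
                  = min (b.count ch : Int) (l.count ch : Int) + 1
              rw [hminZ])).symm
      · have hge : (b.count ch : Int) ≤ (l.count ch : Int) := by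
          have := ih1 ch; rw [this] at hpos; omega
        have hminZ : min (b.count ch : Int) ((l ++ [ch]).count ch : Int)
            = min (b.count ch : Int) (l.count ch : Int) := by
          rw [hcnt_ch]; omega
        simp only [if_neg hpos]
        constructor
        · intro c
          rw [ih1 c]
          by_cases hc : c = ch
          · subst hc; rw [hminZ]
          · rw [pv_count_append_ne l ch c hc]
        · rw [ih2]
          apply congrArg
          apply List.map_congr_left
          intro c _
          by_cases hc : c = ch
          · subst hc; rw [hminZ]
          · rw [pv_count_append_ne l ch c hc]

-- ===== VERDICT (by name: the statement is the Claim_ definition above) =====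
theorem min_operations_to_anagram_spec : Claim_equal_min_operations_to_anagram := by
  intro s t _
  unfold Spec_min_operations_to_anagram min_operations_to_anagram min_operations_to_anagram_alt
  simp only [PySem.Dict.foldl_insert_getD_add_one_eq_counter]
  set a := s.toList with ha
  set b := t.toList with hb
  rw [PySem.Dict.keys_counter a, PySem.Dict.keys_counter b,
      PySem.Set.ofList_ofList a, PySem.Set.ofList_ofList b]
  set u := PySem.Set.union (PySem.Set.ofList a) (PySem.Set.ofList b) with hu
  have hnu : u.Nodup := PySem.Set.nodup_union _ _ (PySem.Set.nodup_ofList a)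
  have hmu : ∀ x, x ∈ u ↔ x ∈ a ∨ x ∈ b := by
    intro x
    rw [hu, PySem.Set.mem_union]
    simp [PySem.Set.mem_ofList]
  rw [PySem.List.foldl_add (g := fun c =>
      |(PySem.Dict.counter a).getD c 0 - (PySem.Dict.counter b).getD c 0|)]
  simp only [PySem.Dict.getD_counter, zero_add]
  have hmap : (u.map (fun c => |(a.count c : Int) - (b.count c : Int)|))
      = u.map (fun c => (a.count c : Int) + (b.count c : Int)
          - 2 * min ((b.count c : Int)) ((a.count c : Int))) := by
    apply List.map_congr_left
    intro c _
    rw [pv_abs_sub, min_comm]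
  rw [hmap,
      pv_sum_split u (fun c => (a.count c : Int)) (fun c => (b.count c : Int))
        (fun c => min ((b.count c : Int)) ((a.count c : Int))),
      pv_sum_count a u hnu (fun x hx => (hmu x).mpr (Or.inl hx)),
      pv_sum_count b u hnu (fun x hx => (hmu x).mpr (Or.inr hx))]
  obtain ⟨_, h2⟩ := pv_greedy b a
  rw [h2, PySem.Str.len_eq, PySem.Str.len_eq, ← ha, ← hb]
  have hre := pv_sum_reindex u (PySem.Set.ofList b) hnu (PySem.Set.nodup_ofList b)
    (fun c => min ((b.count c : Int)) ((a.count c : Int))) (fun c => c ∈ b)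
    (by
      intro c hc
      show min ((b.count c : Int)) ((a.count c : Int)) = 0
      rw [List.count_eq_zero_of_not_mem hc]
      simp)
    (fun c hc => (hmu c).mpr (Or.inr hc))
    (fun c hc => (PySem.Set.mem_ofList b c).mpr hc)
  rw [hre]
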